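-- pv_equiv track=rewrite | github.com/krzyssikora/advent_of_code | aoc_2022/15_beacon_exclusive_zone.py | find_containing_range
-- ===== SOURCE A (Python) =====
-- def find_containing_range(
--         value: int,
--         ranges: list,
--         idx_from: int,
--         idx_to: int,
--         down: bool
-- ):
--     if idx_to < idx_from:
--         return False, idx_from if down else idx_from
--     idx_mid = (idx_from + idx_to) // 2
--     mid_range_start, mid_range_end = ranges[idx_mid]
--     mid_range_end -= 1
--     if mid_range_start <= value <= mid_range_end:
--         return True, idx_mid
--     if value < mid_range_start:
--         return find_containing_range(value, ranges, idx_from, idx_mid - 1, down)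
--     if value > mid_range_end:
--         return find_containing_range(value, ranges, idx_mid + 1, idx_to, down)
-- ===== SOURCE B (Python) =====
-- def find_containing_range(value, ranges, idx_from, idx_to, down):
--     # Iterative binary search; `down` is kept (unused, as in the original).
--     lo, hi = idx_from, idx_to
--     while lo <= hi:
--         mid = (lo + hi) // 2
--         start, end = ranges[mid]
--         if value < start:
--             hi = mid - 1
--         elif value >= end:
--             lo = mid + 1
--         else:
--             return True, mid
--     return False, lo
-- ===== Notes on version B (the rewrite author's own statement) =====
-- stated objective: idiomatic
-- what changed: Replaced the recursive binary search by an iterative lo/hi loop, folding the `end -= 1` adjustment into direct `value < start` / `value >= end` comparisons.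
-- outside the precondition, e.g. on find_containing_range(0, [(0, 2)], -1, 1, False): A returns (True, 0), B returns (True, 0)
import Mathlib
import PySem

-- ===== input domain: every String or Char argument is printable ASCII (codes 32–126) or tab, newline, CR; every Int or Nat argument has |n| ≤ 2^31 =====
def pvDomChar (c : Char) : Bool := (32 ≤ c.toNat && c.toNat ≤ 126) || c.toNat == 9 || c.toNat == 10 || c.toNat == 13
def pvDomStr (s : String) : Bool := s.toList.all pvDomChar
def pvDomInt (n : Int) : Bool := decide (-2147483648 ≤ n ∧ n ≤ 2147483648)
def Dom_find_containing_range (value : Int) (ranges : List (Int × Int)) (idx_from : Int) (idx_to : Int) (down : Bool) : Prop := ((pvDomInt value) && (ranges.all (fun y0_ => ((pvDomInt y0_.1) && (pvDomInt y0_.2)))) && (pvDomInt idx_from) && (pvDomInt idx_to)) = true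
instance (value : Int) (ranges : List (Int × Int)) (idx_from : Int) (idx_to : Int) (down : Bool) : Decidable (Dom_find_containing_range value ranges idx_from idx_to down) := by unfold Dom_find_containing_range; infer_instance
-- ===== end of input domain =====

-- B rewrites A's recursive binary search as an iterative lo/hi loop (idiomatic decomposition; `down` stays as a dead parameter, return value only).

-- ===== PORT A =====
-- literal transliteration of A's recursion; the `none` arm is Python's IndexError, excluded by Pre_
def find_containing_range (value : Int) (ranges : List (Int × Int)) (idx_from : Int) (idx_to : Int) (down : Bool) : Bool × Int :=
  if idx_to < idx_from then
    (false, if down then idx_from else idx_from)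
  else
    let idx_mid := PySem.Int.floordiv (idx_from + idx_to) 2
    match PySem.List.pyGet? ranges idx_mid with
    | none => (false, 0)  -- IndexError in Python; outside Pre_
    | some (mid_range_start, mid_range_end0) =>
      let mid_range_end := mid_range_end0 - 1
      if mid_range_start ≤ value ∧ value ≤ mid_range_end then (true, idx_mid)
      else if value < mid_range_start then
        find_containing_range value ranges idx_from (idx_mid - 1) down
      else if value > mid_range_end then
        find_containing_range value ranges (idx_mid + 1) idx_to down
      else (false, 0)  -- unreachable: Python falls off the end (returns None) never, by trichotomy
termination_by (idx_to + 1 - idx_from).toNat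
decreasing_by
  all_goals
    have h := PySem.Int.floordiv_two_mid_bounds (lo := idx_from) (hi := idx_to) (by omega)
    omega

-- ===== PORT B =====
-- the while-loop of Source B, carried state (lo, hi)
def pvAltLoop (value : Int) (ranges : List (Int × Int)) (lo : Int) (hi : Int) : Bool × Int :=
  if lo ≤ hi then
    let mid := PySem.Int.floordiv (lo + hi) 2
    match PySem.List.pyGet? ranges mid with
    | none => (false, 0)  -- IndexError in Python; outside Pre_
    | some (start, «end») =>
      if value < start then pvAltLoop value ranges lo (mid - 1)
      else if value ≥ «end» then pvAltLoop value ranges (mid + 1) hi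
      else (true, mid)
  else (false, lo)
termination_by (hi + 1 - lo).toNat
decreasing_by
  all_goals
    have h := PySem.Int.floordiv_two_mid_bounds (lo := lo) (hi := hi) (by omega)
    omega

def find_containing_range_alt (value : Int) (ranges : List (Int × Int)) (idx_from : Int) (idx_to : Int) (down : Bool) : Bool × Int :=
  pvAltLoop value ranges idx_from idx_to

-- ===== PRECONDITION & SPEC =====
-- Pre_ excludes index bounds that reach outside [-len, len) on a non-empty interval: there Python's
-- indexing usually raises IndexError; on the few such inputs where the search returns anyway by an
-- early hit before touching an out-of-range index, B returns the same value.
def Pre_find_containing_range (value : Int) (ranges : List (Int × Int)) (idx_from : Int) (idx_to : Int) (down : Bool) : Prop :=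
  idx_to < idx_from ∨ (-(ranges.length : Int) ≤ idx_from ∧ idx_to < (ranges.length : Int))
instance (value : Int) (ranges : List (Int × Int)) (idx_from : Int) (idx_to : Int) (down : Bool) : Decidable (Pre_find_containing_range value ranges idx_from idx_to down) := by unfold Pre_find_containing_range; infer_instance

def pvWitness_find_containing_range : Int × (List (Int × Int)) × Int × Int × Bool := (4, [(0, 3), (5, 9)], 0, 1, false)

def Spec_find_containing_range (value : Int) (ranges : List (Int × Int)) (idx_from : Int) (idx_to : Int) (down : Bool) (out : Bool × Int) : Prop := out = find_containing_range_alt value ranges idx_from idx_to down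
instance (value : Int) (ranges : List (Int × Int)) (idx_from : Int) (idx_to : Int) (down : Bool) (out : Bool × Int) : Decidable (Spec_find_containing_range value ranges idx_from idx_to down out) := by unfold Spec_find_containing_range; infer_instance

-- ===== CLAIM (what is proved, stated in full; the proofs are below) =====
def Claim_equal_find_containing_range : Prop := ∀ (value : Int) (ranges : List (Int × Int)) (idx_from : Int) (idx_to : Int) (down : Bool), Dom_find_containing_range value ranges idx_from idx_to down → Pre_find_containing_range value ranges idx_from idx_to down → Spec_find_containing_range value ranges idx_from idx_to down (find_containing_range value ranges idx_from idx_to down)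

-- ===== LEMMAS AND PROOFS =====

theorem pv_key (value : Int) (ranges : List (Int × Int)) (down : Bool) (f t : Int)
    (h : t < f ∨ (-(ranges.length : Int) ≤ f ∧ t < (ranges.length : Int))) :
    find_containing_range value ranges f t down = pvAltLoop value ranges f t := by
  by_cases hlt : t < f
  · have hnle : ¬ f ≤ t := not_le.mpr hlt
    unfold find_containing_range pvAltLoop
    rw [if_pos hlt, if_neg hnle]
    cases down <;> rfl
  · have hb : -(ranges.length : Int) ≤ f ∧ t < (ranges.length : Int) := h.resolve_left hlt
    have hmid := PySem.Int.floordiv_two_mid_bounds (lo := f) (hi := t) (by omega)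
    unfold find_containing_range pvAltLoop
    rw [if_neg hlt, if_pos (by omega)]
    simp only
    rcases hget : PySem.List.pyGet? ranges (PySem.Int.floordiv (f + t) 2) with _ | ⟨s, e⟩
    · exfalso
      rw [PySem.List.pyGet?_eq_none_iff] at hget
      exact hget (by unfold PySem.Raise.InRange; omega)
    · dsimp only
      by_cases h1 : s ≤ value ∧ value ≤ e - 1
      · rw [if_pos h1, if_neg (by omega), if_neg (by omega)]
      · rw [if_neg h1]
        by_cases h2 : value < s
        · rw [if_pos h2, if_pos h2]
          exact pv_key value ranges down f (PySem.Int.floordiv (f + t) 2 - 1) (by omega)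
        · rw [if_neg h2, if_pos (by omega), if_neg h2, if_pos (by omega)]
          exact pv_key value ranges down (PySem.Int.floordiv (f + t) 2 + 1) t (by omega)
termination_by (t + 1 - f).toNat
decreasing_by all_goals omega

-- ===== VERDICT (by name: the statement is the Claim_ definition above) =====
theorem find_containing_range_spec : Claim_equal_find_containing_range := by
  intro value ranges idx_from idx_to down _ hpre
  unfold Spec_find_containing_range find_containing_range_alt
  exact pv_key value ranges down idx_from idx_to hpre
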